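-- pv_equiv track=rewrite | github.com/santiagojofre47/BWL-Huffman-Estatico | encode.py | getMatriz
-- ===== SOURCE A (Python) =====
-- def getMatriz(cadena):
--     n = len(cadena)
--     lista = []
--     lista.append(cadena)
--     for i in range(n-1):
--         # Tomar el último carácter
--         c = cadena[-1]
--         # Concatenar el último carácter al inicio y el resto de la cadena después
--         cadena = c + cadena[:-1]
--         lista.append(cadena)
--     lista.sort()
--     return lista
-- ===== SOURCE B (Python) =====
-- def getMatriz(cadena):
--     n = len(cadena)
--     if n == 0:
--         return [cadena]
--     doble = cadena + cadena
--     return sorted(doble[i:i + n] for i in range(n))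
-- ===== Notes on version B (the rewrite author's own statement) =====
-- stated objective: simpler
-- what changed: Instead of repeatedly rebuilding the string by moving its last character to the front and appending each intermediate, B slices every rotation directly out of the doubled string and sorts them.
import Mathlib
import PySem

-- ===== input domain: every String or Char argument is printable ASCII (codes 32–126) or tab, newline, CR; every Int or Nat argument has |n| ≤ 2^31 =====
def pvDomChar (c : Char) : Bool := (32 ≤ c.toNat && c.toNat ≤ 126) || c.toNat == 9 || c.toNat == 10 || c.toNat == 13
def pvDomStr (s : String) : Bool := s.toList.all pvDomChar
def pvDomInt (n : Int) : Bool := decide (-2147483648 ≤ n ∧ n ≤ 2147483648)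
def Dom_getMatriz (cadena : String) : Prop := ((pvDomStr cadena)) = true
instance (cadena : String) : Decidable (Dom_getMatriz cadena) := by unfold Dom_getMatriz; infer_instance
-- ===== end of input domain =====

-- B builds each rotation directly as a slice of the doubled string instead of A's repeated
-- last-char-to-front rebuilding; objective: simpler (same asymptotic cost).

-- ===== PORT A =====
-- loop body of A: c = cadena[-1]; cadena = c + cadena[:-1]   (cadena[-1] is always in
-- range here: the loop runs only when len(cadena) ≥ 2, so the default is never used)
def rotStep (l : List Char) : List Char :=
  (PySem.List.pyGetD l (-1) ' ') :: PySem.List.slice l none (some (-1))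

def getMatriz (cadena : String) : List String :=
  let cs := cadena.toList
  let n := cs.length
  let st := (PySem.List.pyRange 0 ((n : Int) - 1) 1).foldl
    (fun (st : List Char × List (List Char)) _ =>
      let s' := rotStep st.1
      (s', st.2 ++ [s']))
    (cs, [cs])
  PySem.List.sorted (st.2.map String.ofList) (fun x => x) false

-- ===== PORT B =====
def getMatriz_alt (cadena : String) : List String :=
  let cs := cadena.toList
  let n := cs.length
  if n = 0 then [cadena]
  else
    let doble := cs ++ cs
    let rots := (PySem.List.pyRange 0 (n : Int) 1).map
      (fun i => PySem.List.slice doble (some i) (some (i + (n : Int))))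
    PySem.List.sorted (rots.map String.ofList) (fun x => x) false

-- ===== PRECONDITION & SPEC =====
def Spec_getMatriz (cadena : String) (out : List String) : Prop := out = getMatriz_alt cadena
instance (cadena : String) (out : List String) : Decidable (Spec_getMatriz cadena out) := by unfold Spec_getMatriz; infer_instance

-- ===== CLAIM (what is proved, stated in full; the proofs are below) =====
def Claim_equal_getMatriz : Prop := ∀ (cadena : String), Dom_getMatriz cadena → Spec_getMatriz cadena (getMatriz cadena)

-- ===== LEMMAS AND PROOFS =====

-- left rotation by i
def rotL (cs : List Char) (i : Nat) : List Char := cs.drop i ++ cs.take i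

lemma rotStep_spec (l : List Char) (h : l ≠ []) : rotStep l = l.getLast h :: l.dropLast := by
  simp [rotStep, PySem.List.pyGetD_neg_one _ _ h, PySem.List.slice_to_neg_one]

lemma loopA (m : Nat) (s0 : List Char) (acc : List (List Char)) :
    (PySem.List.pyRange 0 (m : Int) 1).foldl
      (fun (st : List Char × List (List Char)) _ =>
        let s' := rotStep st.1
        (s', st.2 ++ [s'])) (s0, acc)
    = (rotStep^[m] s0, acc ++ (List.range m).map (fun k => rotStep^[k+1] s0)) := by
  induction m generalizing acc with
  | zero => simp [PySem.List.pyRange]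
  | succ m ih =>
    rw [show ((m+1 : Nat) : Int) = (m : Int) + 1 by push_cast; ring,
        PySem.List.pyRange_one_succ_right (by exact_mod_cast Nat.zero_le m)]
    rw [List.foldl_append, ih]
    simp [List.range_succ, Function.iterate_succ_apply']

lemma rotStep_concat (ys : List Char) (c : Char) : rotStep (ys ++ [c]) = c :: ys := by
  have hne : ys ++ [c] ≠ [] := by simp
  rw [rotStep_spec _ hne]
  simp

lemma rotStep_rotL (cs : List Char) (i : Nat) (h1 : 1 ≤ i) (h2 : i ≤ cs.length) :
    rotStep (rotL cs i) = rotL cs (i - 1) := by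
  have hi1 : i - 1 < cs.length := by omega
  have htake : cs.take i = cs.take (i-1) ++ [cs[i-1]] := by
    conv_lhs => rw [show i = (i-1)+1 by omega]
    rw [List.take_add_one]
    simp [List.getElem?_eq_getElem hi1]
  have hdrop : cs.drop (i-1) = cs[i-1] :: cs.drop i := by
    have h := List.drop_eq_getElem_cons hi1
    rwa [show i - 1 + 1 = i from by omega] at h
  simp only [rotL, htake, ← List.append_assoc]
  rw [rotStep_concat, hdrop]
  simp

lemma rotStep_iterate (cs : List Char) (j : Nat) (hj : j ≤ cs.length) :
    rotStep^[j] cs = rotL cs (cs.length - j) := by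
  induction j with
  | zero => simp [rotL, List.drop_length, List.take_length]
  | succ j ih =>
    rw [Function.iterate_succ_apply', ih (by omega),
        rotStep_rotL cs (cs.length - j) (by omega) (by omega)]
    rw [Nat.sub_sub]

lemma slice_doble (cs : List Char) (i : Nat) (hi : i ≤ cs.length) :
    PySem.List.slice (cs ++ cs) (some (i : Int)) (some ((i : Int) + (cs.length : Int)))
      = rotL cs i := by
  rw [PySem.List.slice_natCast_add, List.drop_append, Nat.sub_eq_zero_of_le hi,
      List.drop_zero, List.take_append]
  have hlen : (List.drop i cs).length = cs.length - i := by simp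
  rw [List.take_of_length_le (by omega), hlen, Nat.sub_sub_self hi, rotL]

lemma sorted_congr (xs ys : List String) (h : xs.Perm ys) :
    PySem.List.sorted xs (fun x => x) false = PySem.List.sorted ys (fun x => x) false := by
  refine List.Perm.eq_of_pairwise ?_ (PySem.List.sorted_pairwise xs _)
    (PySem.List.sorted_pairwise ys _) ?_
  · intro a b _ _ hab hba; exact le_antisymm hab hba
  · exact (PySem.List.sorted_perm xs _ _).trans (h.trans (PySem.List.sorted_perm ys _ _).symm)

-- the two unsorted rotation lists are permutations of each other (nonempty case)
lemma rotations_perm (cs : List Char) (hcs : cs ≠ []) :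
    (cs :: (List.range (cs.length - 1)).map (fun k => rotStep^[k+1] cs)).Perm
      ((List.range cs.length).map (fun i => rotL cs i)) := by
  set n := cs.length with hn
  have hn1 : 1 ≤ n := by
    have := List.length_pos_iff.mpr hcs
    omega
  have hsplit : List.range n = 0 :: (List.range (n-1)).map Nat.succ := by
    conv_lhs => rw [show n = (n-1) + 1 by omega]
    exact List.range_succ_eq_map
  rw [hsplit]
  simp only [List.map_cons, List.map_map]
  have h0 : rotL cs 0 = cs := by simp [rotL]
  rw [h0]
  refine List.Perm.cons cs ?_
  have hrev : (List.range (n-1)).map (fun k => rotStep^[k+1] cs)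
      = ((List.range (n-1)).map (fun k => rotL cs (k+1))).reverse := by
    apply List.ext_getElem
    · simp
    · intro i h1 h2
      simp only [List.getElem_map, List.getElem_range, List.getElem_reverse,
        List.length_map, List.length_range, List.length_reverse] at h1 h2 ⊢
      rw [rotStep_iterate cs (i+1) (by omega)]
      congr 1
      omega
  rw [hrev]
  have : ((List.range (n-1)).map (fun k => rotL cs (k+1)))
      = (List.range (n-1)).map (rotL cs ∘ Nat.succ) := by rfl
  rw [this] at *
  exact List.reverse_perm _

lemma empty_case : PySem.List.sorted ([String.ofList []]) (fun x => x) false = [""] := by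
  decide

theorem getMatriz_spec_aux (cadena : String) :
    getMatriz cadena = getMatriz_alt cadena := by
  simp only [getMatriz, getMatriz_alt]
  by_cases h0 : cadena.toList.length = 0
  · have hnil : cadena.toList = [] := List.length_eq_zero_iff.mp h0
    have hcad : cadena = "" := by
      have := congrArg String.ofList hnil
      simpa using this
    rw [h0, hnil]
    norm_num [PySem.List.pyRange]
    rw [hcad]
    exact empty_case
  · set cs := cadena.toList with hcs
    set n := cs.length with hn
    have hne : cs ≠ [] := by
      intro h
      rw [h] at hn
      simp [hn] at h0
    have hn1 : 1 ≤ n := by omega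
    rw [if_neg h0]
    have hcast : (n : Int) - 1 = ((n - 1 : Nat) : Int) := by push_cast [hn1]; ring
    rw [hcast, loopA]
    simp only [List.singleton_append]
    apply sorted_congr
    have hB : ((PySem.List.pyRange 0 (n : Int) 1).map
        (fun i => PySem.List.slice (cs ++ cs) (some i) (some (i + (n : Int)))))
        = (List.range n).map (fun i => rotL cs i) := by
      rw [PySem.List.pyRange_zero_natCast, List.map_map]
      apply List.map_congr_left
      intro i hi
      simp only [Function.comp]
      exact slice_doble cs i (by simp at hi; omega)
    rw [hB]
    exact (rotations_perm cs hne).map String.ofList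

-- ===== VERDICT (by name: the statement is the Claim_ definition above) =====
theorem getMatriz_spec : Claim_equal_getMatriz := by
  intro cadena _
  exact getMatriz_spec_aux cadena
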